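-- pv_equiv track=rewrite | github.com/Rantv1979/RTV-Intraday | # Rantv  Intraday Terminal Pro wi (1).py | clean_stock_list
-- ===== SOURCE A (Python) =====
-- def clean_stock_list(lst):
--     """Clean stock list"""
--     clean = []
--     for s in lst:
--         if isinstance(s, str):
--             t = s.strip().upper()
--             if not t.endswith(".NS"):
--                 t = t + ".NS"
--             clean.append(t)
--     return list(dict.fromkeys(clean))
-- ===== SOURCE B (Python) =====
-- def clean_stock_list(lst):
--     """Clean stock list"""
--     first = {}
--     for i, s in enumerate(lst):
--         if isinstance(s, str):
--             t = s.strip().upper()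
--             if not t.endswith(".NS"):
--                 t = t + ".NS"
--             first.setdefault(t, i)
--     return sorted(first, key=first.get)
-- ===== Notes on version B (the rewrite author's own statement) =====
-- stated objective: alternative
-- what changed: A appends every normalized ticker to a list and deduplicates it afterwards with dict.fromkeys; B instead records each normalized ticker's first-occurrence index in a dict via setdefault while enumerating, and produces the result by sorting the dict's keys by that index.
import Mathlib
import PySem

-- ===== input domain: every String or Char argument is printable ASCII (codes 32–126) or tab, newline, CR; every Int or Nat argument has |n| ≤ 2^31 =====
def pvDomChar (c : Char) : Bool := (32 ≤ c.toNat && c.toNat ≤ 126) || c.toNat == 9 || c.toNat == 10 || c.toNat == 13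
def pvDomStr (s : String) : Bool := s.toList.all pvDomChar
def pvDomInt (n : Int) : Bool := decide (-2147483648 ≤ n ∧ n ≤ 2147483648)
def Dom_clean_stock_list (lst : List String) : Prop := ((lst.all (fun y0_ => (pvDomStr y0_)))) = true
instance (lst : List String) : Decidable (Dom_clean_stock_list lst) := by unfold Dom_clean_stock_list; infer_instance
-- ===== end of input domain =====

-- B replaces A's normalize-then-dict.fromkeys pipeline by a dict of first-occurrence
-- indices built with setdefault, returned as the keys sorted by that index; objective:
-- alternative. (Under the type convention every element is a String, so A's isinstance
-- guard is always true in both ports.)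

-- ===== PORT A =====
def clean_stock_list (lst : List String) : List String :=
  let clean := lst.foldl (fun clean s =>
    let t := PySem.Str.upper (PySem.Str.strip s)
    let t := if PySem.Str.endswith t ".NS" then t else t ++ ".NS"
    clean ++ [t]) []
  PySem.List.dedup clean

-- ===== PORT B =====
-- sorted(first, key=first.get): iterating the dict yields its keys; every key is
-- present in `first`, so Python's first.get returns its int value — getD … 0 is exact there.
def clean_stock_list_alt (lst : List String) : List String :=
  let first := (PySem.List.enumerate lst).foldl (fun first (p : Int × String) =>
    let t := PySem.Str.upper (PySem.Str.strip p.2)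
    let t := if PySem.Str.endswith t ".NS" then t else t ++ ".NS"
    PySem.Dict.setdefault first t p.1) PySem.Dict.empty
  PySem.List.sorted (PySem.Dict.keys first) (fun t => PySem.Dict.getD first t 0) false

-- ===== PRECONDITION & SPEC =====
def Spec_clean_stock_list (lst : List String) (out : List String) : Prop := out = clean_stock_list_alt lst
instance (lst : List String) (out : List String) : Decidable (Spec_clean_stock_list lst out) := by unfold Spec_clean_stock_list; infer_instance

-- ===== CLAIM (what is proved, stated in full; the proofs are below) =====
def Claim_equal_clean_stock_list : Prop := ∀ (lst : List String), Dom_clean_stock_list lst → Spec_clean_stock_list lst (clean_stock_list lst)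

-- ===== LEMMAS AND PROOFS =====

-- the shared per-element normalization, named for the proofs only
def pvNorm (s : String) : String :=
  let t := PySem.Str.upper (PySem.Str.strip s)
  if PySem.Str.endswith t ".NS" then t else t ++ ".NS"

-- B's loop body, named for the proofs (definitionally the port's lambda)
def pvStep (d : PySem.Dict String Int) (p : Int × String) : PySem.Dict String Int :=
  PySem.Dict.setdefault d (pvNorm p.2) p.1

-- invariant of B's loop: the keys accumulate exactly as a Set.add fold of the
-- normalized elements, all stored values stay below the running index, and the
-- keys remain strictly increasing under their stored first indices
set_option maxHeartbeats 1000000 in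
lemma pvLoopB (xs : List String) : ∀ (i : Int) (d : PySem.Dict String Int),
    (∀ k v, d.get? k = some v → v < i) →
    d.keys.Pairwise (fun a b => d.getD a 0 < d.getD b 0) →
    (((PySem.List.enumerate xs i).foldl pvStep d).keys
        = (xs.map pvNorm).foldl PySem.Set.add d.keys)
    ∧ (∀ k v, ((PySem.List.enumerate xs i).foldl pvStep d).get? k = some v → v < i + xs.length)
    ∧ ((PySem.List.enumerate xs i).foldl pvStep d).keys.Pairwise
        (fun a b => ((PySem.List.enumerate xs i).foldl pvStep d).getD a 0
                  < ((PySem.List.enumerate xs i).foldl pvStep d).getD b 0) := by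
  induction xs with
  | nil =>
    intro i d hb hp
    refine ⟨?_, fun k v h => ?_, ?_⟩
    · simp [PySem.List.enumerate_nil]
    · simp only [PySem.List.enumerate_nil, List.foldl_nil] at h
      have := hb k v h; simp; omega
    · simpa [PySem.List.enumerate_nil] using hp
  | cons x xs ih =>
    intro i d hb hp
    rw [PySem.List.enumerate_cons]
    simp only [List.foldl_cons, List.map_cons]
    by_cases hc : d.contains (pvNorm x) = true
    · -- duplicate: the dict is unchanged by this step
      have hd : pvStep d (i, x) = d := PySem.Dict.setdefault_of_contains d i hc
      have hm : pvNorm x ∈ d.keys := (PySem.Dict.contains_iff_mem_keys d (pvNorm x)).mp hc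
      have hadd : PySem.Set.add d.keys (pvNorm x) = d.keys := by
        simp [PySem.Set.add, PySem.Set.contains_eq_listContains, hm]
      have hb1 : ∀ k v, d.get? k = some v → v < i + 1 := fun k v h => by
        have := hb k v h; omega
      obtain ⟨h1, h2, h3⟩ := ih (i + 1) d hb1 hp
      rw [hd]
      refine ⟨by rw [h1, hadd], fun k v h => ?_, h3⟩
      have := h2 k v h
      simp only [List.length_cons] at *
      push_cast at *
      omega
    · -- first occurrence: the pair (pvNorm x, i) is appended
      have hd : pvStep d (i, x) = d.insert (pvNorm x) i :=
        PySem.Dict.setdefault_of_not_contains d i (by simpa using hc)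
      have hkeys : (d.insert (pvNorm x) i).keys = d.keys ++ [pvNorm x] :=
        PySem.Dict.keys_insert_of_not_contains d i (by simpa using hc)
      have hnotmem : pvNorm x ∉ d.keys := fun hm =>
        hc ((PySem.Dict.contains_iff_mem_keys d (pvNorm x)).mpr hm)
      have hb1 : ∀ k v, (d.insert (pvNorm x) i).get? k = some v → v < i + 1 := by
        intro k v h
        rw [PySem.Dict.get?_insert d (pvNorm x) k i] at h
        split_ifs at h with he
        · injection h with h'; omega
        · have := hb k v h; omega
      have hp1 : (d.insert (pvNorm x) i).keys.Pairwise
          (fun a b => (d.insert (pvNorm x) i).getD a 0 < (d.insert (pvNorm x) i).getD b 0) := by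
        rw [hkeys, List.pairwise_append]
        refine ⟨?_, List.pairwise_singleton _ _, ?_⟩
        · -- old pairs: getD is unchanged on old keys (≠ pvNorm x)
          refine hp.imp_of_mem ?_
          intro a b ha hb' hlt
          have hna : a ≠ pvNorm x := fun h => hnotmem (h ▸ ha)
          have hnb : b ≠ pvNorm x := fun h => hnotmem (h ▸ hb')
          rw [PySem.Dict.getD_insert, PySem.Dict.getD_insert, if_neg hna, if_neg hnb]
          exact hlt
        · -- each old key's value is < i = the new key's value
          intro a ha b hbmem
          have hbx : b = pvNorm x := by simpa using hbmem
          have hna : a ≠ pvNorm x := fun h => hnotmem (h ▸ ha)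
          obtain ⟨v, hv⟩ : ∃ v, d.get? a = some v := by
            rcases h : d.get? a with _ | v
            · exact absurd ((PySem.Dict.get?_eq_none_iff_not_mem_keys d a).mp h) (by simp [ha])
            · exact ⟨v, rfl⟩
          have hvi : v < i := hb a v hv
          have hga : (d.insert (pvNorm x) i).getD a 0 = d.getD a 0 := by
            rw [PySem.Dict.getD_insert]; exact if_neg hna
          have hgb : (d.insert (pvNorm x) i).getD (pvNorm x) 0 = i := by
            rw [PySem.Dict.getD_insert]; exact if_pos rfl
          rw [hbx, hga, hgb, PySem.Dict.getD_of_get?_eq_some d 0 hv]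
          exact hvi
      obtain ⟨h1, h2, h3⟩ := ih (i + 1) (d.insert (pvNorm x) i) hb1 hp1
      have hadd : PySem.Set.add d.keys (pvNorm x) = d.keys ++ [pvNorm x] := by
        simp [PySem.Set.add, hnotmem]
      rw [hd]
      refine ⟨by rw [h1, hkeys, hadd], fun k v h => ?_, h3⟩
      have := h2 k v h
      simp only [List.length_cons] at *
      push_cast at *
      omega

-- ===== VERDICT (by name: the statement is the Claim_ definition above) =====
theorem clean_stock_list_spec : Claim_equal_clean_stock_list := by
  intro lst _
  show clean_stock_list lst = clean_stock_list_alt lst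
  have hA : clean_stock_list lst = PySem.List.dedup (lst.map pvNorm) := by
    unfold clean_stock_list
    rw [PySem.List.foldl_append_singleton_eq_map, List.nil_append]
    rfl
  have hB : clean_stock_list_alt lst
      = PySem.List.sorted ((List.foldl pvStep PySem.Dict.empty (PySem.List.enumerate lst)).keys)
          (fun t => (List.foldl pvStep PySem.Dict.empty (PySem.List.enumerate lst)).getD t 0) := rfl
  obtain ⟨h1, -, h3⟩ := pvLoopB lst 0 PySem.Dict.empty
    (by intro k v h; simp [PySem.Dict.empty, PySem.Dict.get?] at h)
    (by simp [PySem.Dict.empty, PySem.Dict.keys])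
  have hkeys : (List.foldl pvStep PySem.Dict.empty (PySem.List.enumerate lst)).keys
      = PySem.List.dedup (lst.map pvNorm) := by
    rw [h1, PySem.List.dedup_eq_ofList, PySem.Set.ofList_eq_foldl]
    rfl
  rw [hA, hB, PySem.List.sorted_eq_of_perm_of_pairwise_lt _ _ _ (List.Perm.refl _) h3]
  exact hkeys.symm
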